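-- pv_equiv track=rewrite | github.com/rbuxey/Structure-and-Interpretation-of-Computer-Programs | Project 3: Cats/cats.py | shifty_shifts
-- ===== SOURCE A (Python) =====
-- def shifty_shifts(start, goal, limit):
--     """A diff function for autocorrect that determines how many letters
--     in START need to be substituted to create GOAL, then adds the difference in
--     their lengths.
--     """
--     # BEGIN PROBLEM 6
--     start_letter = start[:1]
--     rest_start = start[1:]
--     goal_letter = goal[:1]
--     rest_goal = goal[1:]
--
--     if start == goal:
--         return 0
--     elif len(start) == 0 or len(goal) == 0:
--         return len(start) + len(goal)
--     elif limit == 0: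
--         return limit + 1
--     elif start_letter == goal_letter:
--         same = shifty_shifts(rest_start, rest_goal, limit)
--         return same
--     else:
--         different = 1 + shifty_shifts(rest_start, rest_goal, limit-1)
--         return different
-- ===== SOURCE B (Python) =====
-- def shifty_shifts(start, goal, limit):
--     """Count how many letters must be substituted to turn START into GOAL,
--     plus the difference in their lengths; once more than LIMIT edits would be
--     needed, give up and report limit + 1.  Single index pass, no slicing."""
--     n, m = len(start), len(goal)
--     eq_from = None
--     if n == m:
--         # smallest index from which the two strings already agree
--         eq_from = n
--         while eq_from and start[eq_from - 1] == goal[eq_from - 1]: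
--             eq_from -= 1
--     subs = 0
--     for i in range(min(n, m)):
--         if i == eq_from:
--             return subs          # the rest already matches
--         if subs == limit:
--             return limit + 1     # over budget: any value beyond the limit
--         if start[i] != goal[i]:
--             subs += 1
--     return subs + abs(n - m)
-- ===== Notes on version B (the rewrite author's own statement) =====
-- stated objective: faster
-- what changed: Replaces A's per-character recursion (each step rebuilding both strings with O(n) slices) by a single index loop that counts substitutions with a budget check, with the common-suffix start precomputed once so the 'rest already matches' early exit is an O(1) index comparison.
import Mathlib
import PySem

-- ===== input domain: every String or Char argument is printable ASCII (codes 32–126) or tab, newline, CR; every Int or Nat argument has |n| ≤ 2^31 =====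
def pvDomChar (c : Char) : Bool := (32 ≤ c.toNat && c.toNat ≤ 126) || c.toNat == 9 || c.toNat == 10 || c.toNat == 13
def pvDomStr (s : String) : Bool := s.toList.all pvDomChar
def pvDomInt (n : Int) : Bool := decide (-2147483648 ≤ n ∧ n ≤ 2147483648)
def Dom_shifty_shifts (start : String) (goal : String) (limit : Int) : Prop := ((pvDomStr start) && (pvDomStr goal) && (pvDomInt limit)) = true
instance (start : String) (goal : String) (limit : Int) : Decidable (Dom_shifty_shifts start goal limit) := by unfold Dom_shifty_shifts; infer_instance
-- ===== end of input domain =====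

-- B replaces A's slicing recursion by one index pass with a precomputed
-- common-suffix start; objective: faster.

-- ===== PORT A =====
-- A's recursion, transcribed over List Char (strings are compared by content in
-- Python, = list equality here).  s[:1] is `take 1` and s[1:] is `drop 1`: exact
-- for these fixed nonnegative slice bounds on any list.
def pvAgo (start goal : List Char) (limit : Int) : Int :=
  let start_letter := start.take 1
  let rest_start := start.drop 1
  let goal_letter := goal.take 1
  let rest_goal := goal.drop 1
  if start = goal then 0
  else if h : start.length = 0 ∨ goal.length = 0 then (start.length : Int) + (goal.length : Int)
  else if limit = 0 then limit + 1
  else if start_letter = goal_letter then pvAgo rest_start rest_goal limit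
  else 1 + pvAgo rest_start rest_goal (limit - 1)
termination_by start.length
decreasing_by
  all_goals simp only [List.length_drop]; omega

def shifty_shifts (start : String) (goal : String) (limit : Int) : Int :=
  pvAgo start.toList goal.toList limit

-- ===== PORT B =====
-- Source B's `while eq_from and start[eq_from-1] == goal[eq_from-1]: eq_from -= 1`,
-- started at eq_from = n; the indexed accesses are in range at every call site.
def pvEqLoop (s g : List Char) : Nat → Nat
  | 0 => 0
  | e + 1 => if s[e]? = g[e]? then pvEqLoop s g e else e + 1

-- Source B's `for i in range(min(n, m))` loop: one iteration per index while both
-- suffixes are nonempty (element i is the head of the remaining suffixes),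
-- falling through to `subs + abs(n - m)` when either runs out.
def pvBloop (eqf : Option Nat) (n m : Nat) : List Char → List Char → Nat → Nat → Int → Int
  | a :: s', b :: g', i, subs, l =>
      if some i = eqf then (subs : Int)
      else if (subs : Int) = l then l + 1
      else if a ≠ b then pvBloop eqf n m s' g' (i + 1) (subs + 1) l
      else pvBloop eqf n m s' g' (i + 1) subs l
  | _, _, _, subs, _ => (subs : Int) + |(n : Int) - (m : Int)|

def shifty_shifts_alt (start : String) (goal : String) (limit : Int) : Int :=
  let s := start.toList
  let g := goal.toList
  let n := s.length
  let m := g.length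
  let eqf : Option Nat := if n = m then some (pvEqLoop s g n) else none
  pvBloop eqf n m s g 0 0 limit

-- ===== PRECONDITION & SPEC =====
def Spec_shifty_shifts (start : String) (goal : String) (limit : Int) (out : Int) : Prop := out = shifty_shifts_alt start goal limit
instance (start : String) (goal : String) (limit : Int) (out : Int) : Decidable (Spec_shifty_shifts start goal limit out) := by unfold Spec_shifty_shifts; infer_instance

-- ===== CLAIM =====
def Claim_equal_shifty_shifts : Prop := ∀ (start : String) (goal : String) (limit : Int), Dom_shifty_shifts start goal limit → Spec_shifty_shifts start goal limit (shifty_shifts start goal limit)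

-- ===== LEMMAS AND PROOFS =====

-- pvEqLoop, started at k with the suffixes from k already equal, yields the
-- least index e from which the suffixes are equal.
theorem pvEqLoop_props (s g : List Char) (k : Nat) (hlen : s.length = g.length)
    (hk : k ≤ s.length) (hdrop : s.drop k = g.drop k) :
    pvEqLoop s g k ≤ k ∧ s.drop (pvEqLoop s g k) = g.drop (pvEqLoop s g k) ∧
      (0 < pvEqLoop s g k → s[pvEqLoop s g k - 1]? ≠ g[pvEqLoop s g k - 1]?) := by
  induction k with
  | zero => exact ⟨le_refl _, hdrop, fun h => by simp [pvEqLoop] at h⟩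
  | succ k ih =>
    rw [pvEqLoop]
    by_cases hc : s[k]? = g[k]?
    · rw [if_pos hc]
      have hks : k < s.length := by omega
      have hkg : k < g.length := by omega
      have hdk : s.drop k = g.drop k := by
        rw [List.drop_eq_getElem_cons hks, List.drop_eq_getElem_cons hkg, hdrop]
        have : s[k] = g[k] := by
          have h1 : s[k]? = some s[k] := List.getElem?_eq_getElem hks
          have h2 : g[k]? = some g[k] := List.getElem?_eq_getElem hkg
          rw [h1, h2] at hc; exact Option.some.inj hc
        rw [this]
      obtain ⟨h1, h2, h3⟩ := ih (by omega) hdk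
      exact ⟨by omega, h2, h3⟩
    · rw [if_neg hc]
      exact ⟨le_refl _, hdrop, fun _ => by simpa using hc⟩

-- Loop invariant for pvBloop against A's recursion on the remaining suffixes:
-- the remaining budget is l - subs.
theorem pvBloop_inv (s' : List Char) : ∀ (g' : List Char) (i subs : Nat) (l : Int)
    (eqf : Option Nat) (n m : Nat),
    ((n : Int) - (m : Int) = (s'.length : Int) - (g'.length : Int)) →
    (eqf = none → s'.length ≠ g'.length) →
    (∀ e, eqf = some e → i ≤ e ∧ s'.drop (e - i) = g'.drop (e - i) ∧
      (i < e → s'[e - 1 - i]? ≠ g'[e - 1 - i]?)) →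
    pvBloop eqf n m s' g' i subs l = (subs : Int) + pvAgo s' g' (l - subs) := by
  induction s' with
  | nil =>
    intro g' i subs l eqf n m h1 _ _
    cases g' with
    | nil =>
      have hB : pvBloop eqf n m [] [] i subs l = (subs : Int) + |(n : Int) - (m : Int)| := rfl
      have hA : pvAgo [] [] (l - subs) = 0 := by rw [pvAgo]; simp
      rw [hB, hA]
      simp at h1
      rcases abs_cases ((n : Int) - (m : Int)) with ⟨h, _⟩ | ⟨h, _⟩ <;> omega
    | cons b g'' =>
      have hB : pvBloop eqf n m [] (b :: g'') i subs l = (subs : Int) + |(n : Int) - (m : Int)| := rfl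
      have hA : pvAgo [] (b :: g'') (l - subs) =
          (([] : List Char).length : Int) + ((b :: g'').length : Int) := by
        rw [pvAgo]
        have hne : ([] : List Char) ≠ b :: g'' := by simp
        rw [if_neg hne, dif_pos (by simp)]
      rw [hB, hA]
      simp at h1 ⊢
      rcases abs_cases ((n : Int) - (m : Int)) with ⟨h, _⟩ | ⟨h, _⟩ <;> omega
  | cons a s'' ih =>
    intro g' i subs l eqf n m h1 h2 h3
    cases g' with
    | nil =>
      have hB : pvBloop eqf n m (a :: s'') [] i subs l = (subs : Int) + |(n : Int) - (m : Int)| := rfl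
      have hA : pvAgo (a :: s'') [] (l - subs) =
          (((a :: s'') : List Char).length : Int) + (([] : List Char).length : Int) := by
        rw [pvAgo]
        have hne : (a :: s'' : List Char) ≠ [] := by simp
        rw [if_neg hne, dif_pos (by simp)]
      rw [hB, hA]
      simp at h1 ⊢
      rcases abs_cases ((n : Int) - (m : Int)) with ⟨h, _⟩ | ⟨h, _⟩ <;> omega
    | cons b g'' =>
      rw [pvBloop]
      by_cases heqf : some i = eqf
      · -- rest already matches: s' = g'
        rw [if_pos heqf]
        obtain ⟨_, hd, _⟩ := h3 i heqf.symm
        simp only [Nat.sub_self, List.drop_zero] at hd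
        rw [pvAgo, if_pos hd]
        omega
      · rw [if_neg heqf]
        -- here a :: s'' ≠ b :: g''
        have hneq : (a :: s'' : List Char) ≠ b :: g'' := by
          intro heq
          cases heqfv : eqf with
          | none =>
            exact h2 heqfv (by rw [heq])
          | some e =>
            obtain ⟨hie, _, hmin⟩ := h3 e heqfv
            have hi_lt : i < e := by
              rcases Nat.lt_or_ge i e with h | h
              · exact h
              · exact absurd (heqfv ▸ congrArg some (by omega : i = e)) heqf
            exact hmin hi_lt (by rw [heq])
        rw [pvAgo, if_neg hneq, dif_neg (by simp)]
        by_cases hlim : (subs : Int) = l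
        · rw [if_pos hlim, if_pos (by omega : l - (subs : Int) = 0)]
          omega
        · rw [if_neg hlim, if_neg (by omega : ¬ l - (subs : Int) = 0)]
          -- invariant transfer to the tails
          have step : ∀ e, eqf = some e → i + 1 ≤ e ∧
              s''.drop (e - (i + 1)) = g''.drop (e - (i + 1)) ∧
              (i + 1 < e → s''[e - 1 - (i + 1)]? ≠ g''[e - 1 - (i + 1)]?) := by
            intro e he
            obtain ⟨hie, hd, hmin⟩ := h3 e he
            have hi_lt : i < e := by
              rcases Nat.lt_or_ge i e with h | h
              · exact h
              · exact absurd (he ▸ congrArg some (by omega : i = e)) heqf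
            refine ⟨by omega, ?_, ?_⟩
            · have : e - i = (e - (i + 1)) + 1 := by omega
              rw [this] at hd
              simpa using hd
            · intro hlt
              have hidx : e - 1 - i = (e - 1 - (i + 1)) + 1 := by omega
              have := hmin hi_lt
              rw [hidx] at this
              simpa using this
          have h1' : (n : Int) - (m : Int) = (s''.length : Int) - (g''.length : Int) := by
            simp at h1 ⊢; omega
          have h2' : eqf = none → s''.length ≠ g''.length := by
            intro he
            have := h2 he
            simp at this ⊢; omega
          by_cases hab : a = b
          · rw [if_neg (by simp [hab]), if_pos (by simp [hab] :
              (a :: s'').take 1 = (b :: g'').take 1)]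
            simp only [List.drop_one, List.tail_cons]
            rw [ih g'' (i + 1) subs l eqf n m h1' h2' step]
          · rw [if_pos (by simp [hab]), if_neg (by simp [hab] :
              ¬ (a :: s'').take 1 = (b :: g'').take 1)]
            simp only [List.drop_one, List.tail_cons]
            rw [ih g'' (i + 1) (subs + 1) l eqf n m h1' h2' step]
            push_cast
            ring_nf

-- ===== VERDICT =====
theorem shifty_shifts_spec : Claim_equal_shifty_shifts := by
  intro start goal limit _
  unfold Spec_shifty_shifts shifty_shifts shifty_shifts_alt
  show pvAgo start.toList goal.toList limit =
    pvBloop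
      (if start.toList.length = goal.toList.length then
        some (pvEqLoop start.toList goal.toList start.toList.length) else none)
      start.toList.length goal.toList.length start.toList goal.toList 0 0 limit
  by_cases hnm : start.toList.length = goal.toList.length
  · rw [if_pos hnm]
    obtain ⟨he, hd, hmin⟩ := pvEqLoop_props start.toList goal.toList start.toList.length hnm
      (le_refl _) (by rw [List.drop_length, hnm, List.drop_length])
    have key := pvBloop_inv start.toList goal.toList 0 0 limit
      (some (pvEqLoop start.toList goal.toList start.toList.length))
      start.toList.length goal.toList.length
      (by omega) (by intro h; cases h)
      (by
        intro e hee
        have hev : e = pvEqLoop start.toList goal.toList start.toList.length :=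
          (Option.some.inj hee).symm
        subst hev
        exact ⟨Nat.zero_le _, by simpa using hd, fun h => by simpa using hmin h⟩)
    simp only [Nat.cast_zero, zero_add, sub_zero] at key
    exact key.symm
  · rw [if_neg hnm]
    have key := pvBloop_inv start.toList goal.toList 0 0 limit none
      start.toList.length goal.toList.length
      (by omega) (fun _ => hnm) (by intro e h; cases h)
    simp only [Nat.cast_zero, zero_add, sub_zero] at key
    exact key.symm
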